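-- pv_equiv track=rewrite | github.com/glancaster/ProjectEuler | Python/P18.py | ppath
-- ===== SOURCE A (Python) =====
-- def ppath(path):
--     tri = []
--     l = len(path)
--     i = 0
--     n = 1
--     while n + i <= l:
--         ele = path[i:n+i]
--         tri.append(ele)
--         i=n+i
--         n+=1
--     return tri
-- ===== SOURCE B (Python) =====
-- def ppath(path):
--     tri = []
--     row = []
--     n = 1
--     for x in path:
--         row.append(x)
--         if len(row) == n:
--             tri.append(row)
--             row = []
--             n += 1
--     return tri
-- ===== Notes on version B (the rewrite author's own statement) =====
-- stated objective: alternative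
-- what changed: Replaces index-based slicing (path[i:n+i] inside a while loop over indices) by a single element-wise pass that accumulates a running row and emits it when it reaches the target length, dropping an incomplete trailing row.
import Mathlib
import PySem

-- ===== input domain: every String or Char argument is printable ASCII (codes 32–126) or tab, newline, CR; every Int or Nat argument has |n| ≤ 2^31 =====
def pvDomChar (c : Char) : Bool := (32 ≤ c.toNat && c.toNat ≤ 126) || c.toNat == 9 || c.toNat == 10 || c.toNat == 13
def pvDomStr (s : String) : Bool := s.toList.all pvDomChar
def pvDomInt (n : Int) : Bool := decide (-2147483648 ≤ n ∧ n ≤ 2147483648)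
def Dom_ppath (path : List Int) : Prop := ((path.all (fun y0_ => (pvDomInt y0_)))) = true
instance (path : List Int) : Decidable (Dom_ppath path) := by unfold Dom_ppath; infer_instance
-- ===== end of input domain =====

-- B replaces A's index/slice while-loop by one element-wise pass accumulating a running row (alternative decomposition, same cost).

-- ===== PORT A =====
-- while n + i <= l: tri.append(path[i:n+i]); i = n+i; n += 1
-- (fuel only makes the loop total; path.length+1 iterations always suffice for the actual call i=0, n=1)
def ppathLoop (fuel : Nat) (path : List Int) (l i n : Int) (tri : List (List Int)) : List (List Int) :=
  match fuel with
  | 0 => tri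
  | fuel + 1 =>
    if n + i ≤ l then
      ppathLoop fuel path l (n + i) (n + 1) (tri ++ [PySem.List.slice path (some i) (some (n + i))])
    else tri

def ppath (path : List Int) : List (List Int) :=
  ppathLoop (path.length + 1) path (path.length : Int) 0 1 []

-- ===== PORT B =====
def ppathAltLoop (xs row : List Int) (n : Int) (tri : List (List Int)) : List (List Int) :=
  match xs with
  | [] => tri
  | x :: xs =>
    let row' := row ++ [x]
    if (row'.length : Int) = n then
      ppathAltLoop xs [] (n + 1) (tri ++ [row'])
    else
      ppathAltLoop xs row' n tri

def ppath_alt (path : List Int) : List (List Int) :=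
  ppathAltLoop path [] 1 []

-- ===== PRECONDITION & SPEC =====
def Spec_ppath (path : List Int) (out : List (List Int)) : Prop := out = ppath_alt path
instance (path : List Int) (out : List (List Int)) : Decidable (Spec_ppath path out) := by unfold Spec_ppath; infer_instance

-- ===== CLAIM (what is proved, stated in full; the proofs are below) =====
def Claim_equal_ppath : Prop := ∀ (path : List Int), Dom_ppath path → Spec_ppath path (ppath path)

-- ===== LEMMAS AND PROOFS =====

-- spec helper: rows of lengths k+1, k+2, …, dropping the incomplete tail
def pvChunks (xs : List Int) (k : Nat) : List (List Int) :=
  if h : k + 1 ≤ xs.length then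
    xs.take (k + 1) :: pvChunks (xs.drop (k + 1)) (k + 1)
  else []
termination_by xs.length
decreasing_by simp [List.length_drop]; omega

theorem ppathLoop_eq_chunks (path : List Int) :
    ∀ (fuel k i : Nat) (tri : List (List Int)),
      i ≤ path.length → path.length - i < fuel →
      ppathLoop fuel path (path.length : Int) (i : Int) ((k + 1 : Nat) : Int) tri
        = tri ++ pvChunks (path.drop i) k := by
  intro fuel
  induction fuel with
  | zero => intro k i tri hi hf; omega
  | succ fuel ih =>
    intro k i tri hi hf
    rw [ppathLoop, pvChunks]
    by_cases hg : k + 1 + i ≤ path.length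
    · have hcond : ((k + 1 : Nat) : Int) + (i : Int) ≤ (path.length : Int) := by push_cast; omega
      rw [if_pos hcond]
      have hslice : PySem.List.slice path (some (i : Int)) (some (((k + 1 : Nat) : Int) + (i : Int)))
          = (path.drop i).take (k + 1) := by
        have : ((k + 1 : Nat) : Int) + (i : Int) = ((i + (k + 1) : Nat) : Int) := by push_cast; ring
        rw [this, PySem.List.slice_natCast]
        congr 1
        omega
      have hcast1 : ((k + 1 : Nat) : Int) + (i : Int) = ((k + 1 + i : Nat) : Int) := by push_cast; ring
      have hcast2 : ((k + 1 : Nat) : Int) + 1 = ((k + 1 + 1 : Nat) : Int) := by push_cast; ring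
      rw [hslice, hcast1, hcast2, ih (k + 1) (k + 1 + i) _ (by omega) (by omega)]
      have hlen : k + 1 ≤ (path.drop i).length := by simp [List.length_drop]; omega
      rw [dif_pos hlen]
      have hdd : (path.drop i).drop (k + 1) = path.drop (k + 1 + i) := by
        rw [List.drop_drop]; congr 1; omega
      rw [hdd]
      simp
    · have hcond : ¬ (((k + 1 : Nat) : Int) + (i : Int) ≤ (path.length : Int)) := by push_cast; omega
      rw [if_neg hcond]
      have hlen : ¬ (k + 1 ≤ (path.drop i).length) := by simp [List.length_drop]; omega
      rw [dif_neg hlen]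
      simp

theorem ppathAltLoop_eq_chunks :
    ∀ (xs row : List Int) (k : Nat) (tri : List (List Int)),
      row.length < k + 1 →
      ppathAltLoop xs row ((k + 1 : Nat) : Int) tri = tri ++ pvChunks (row ++ xs) k := by
  intro xs
  induction xs with
  | nil =>
    intro row k tri hr
    rw [ppathAltLoop, pvChunks]
    rw [dif_neg (by simp; omega)]
    simp
  | cons x xs ih =>
    intro row k tri hr
    rw [ppathAltLoop]
    by_cases he : (row ++ [x]).length = k + 1
    · rw [if_pos (by simp_all)]
      have hc : ((k + 1 : Nat) : Int) + 1 = ((k + 1 + 1 : Nat) : Int) := by push_cast; ring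
      rw [hc, ih [] (k + 1) _ (by simp)]
      have htake : (row ++ x :: xs).take (k + 1) = row ++ [x] := by
        have hsplit : row ++ x :: xs = (row ++ [x]) ++ xs := by simp
        rw [hsplit, List.take_append_of_le_length (by omega), List.take_of_length_le (by omega)]
      have hdrop : (row ++ x :: xs).drop (k + 1) = xs := by
        have hsplit : row ++ x :: xs = (row ++ [x]) ++ xs := by simp
        rw [hsplit, List.drop_append_of_le_length (by omega)]
        simp [he]
      have hR : pvChunks (row ++ x :: xs) k = (row ++ [x]) :: pvChunks xs (k + 1) := by
        rw [pvChunks, dif_pos (by simp at he ⊢; omega), htake, hdrop]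
      rw [hR]
      simp
    · rw [if_neg (by simpa using he)]
      rw [ih (row ++ [x]) k _ (by simp at he ⊢; omega)]
      simp

-- ===== VERDICT (by name: the statement is the Claim_ definition above) =====
theorem ppath_spec : Claim_equal_ppath := by
  intro path _
  show ppath path = ppath_alt path
  unfold ppath ppath_alt
  have hA := ppathLoop_eq_chunks path (path.length + 1) 0 0 [] (by omega) (by omega)
  have hB := ppathAltLoop_eq_chunks path [] 0 [] (by simp)
  simpa using hA.trans (by simpa using hB.symm)
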